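-- pv_equiv track=rewrite | github.com/HunterBillion/Hunter888 | apps/api/app/services/season_pass.py | _tier_for_points
-- ===== SOURCE A (Python) =====
-- SEASON_TIER_THRESHOLDS: list[int] = [
--     0,                                                                # T0 (start)
--     50, 120, 200, 300, 420, 560, 720, 900, 1100,                     # T1-T9  (easy)
--     1320,                                                             # T10
--     1560, 1820, 2100, 2400, 2720, 3060, 3420, 3800, 4200,            # T11-T19 (medium)
--     4620,                                                             # T20
--     5060, 5520, 6000, 6500, 7020, 7560, 8120, 8700, 9300,            # T21-T29 (hard)
--     9900,                                                             # T30
-- ]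
--
-- MAX_TIER = 30
--
-- def _tier_for_points(season_points: int) -> int:
--     """Return the highest tier reached for given cumulative season points."""
--     tier = 0
--     for i in range(1, len(SEASON_TIER_THRESHOLDS)):
--         if season_points >= SEASON_TIER_THRESHOLDS[i]:
--             tier = i
--         else:
--             break
--     return min(tier, MAX_TIER)
-- ===== SOURCE B (Python) =====
-- SEASON_TIER_THRESHOLDS: list[int] = [
--     0,
--     50, 120, 200, 300, 420, 560, 720, 900, 1100,
--     1320,
--     1560, 1820, 2100, 2400, 2720, 3060, 3420, 3800, 4200,
--     4620,
--     5060, 5520, 6000, 6500, 7020, 7560, 8120, 8700, 9300,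
--     9900,
-- ]
--
-- MAX_TIER = 30
--
--
-- def _tier_for_points(season_points: int) -> int:
--     """Highest tier reached: binary search (bisect_right) over the sorted thresholds."""
--     lo, hi = 0, len(SEASON_TIER_THRESHOLDS)
--     while lo < hi:
--         mid = (lo + hi) // 2
--         if season_points < SEASON_TIER_THRESHOLDS[mid]:
--             hi = mid
--         else:
--             lo = mid + 1
--     return min(max(lo - 1, 0), MAX_TIER)
-- ===== Notes on version B (the rewrite author's own statement) =====
-- stated objective: alternative
-- what changed: Replaced the linear scan-with-break over the threshold list by a hand-rolled bisect_right binary search, clamping the resulting index into [0, MAX_TIER].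
import Mathlib
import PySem

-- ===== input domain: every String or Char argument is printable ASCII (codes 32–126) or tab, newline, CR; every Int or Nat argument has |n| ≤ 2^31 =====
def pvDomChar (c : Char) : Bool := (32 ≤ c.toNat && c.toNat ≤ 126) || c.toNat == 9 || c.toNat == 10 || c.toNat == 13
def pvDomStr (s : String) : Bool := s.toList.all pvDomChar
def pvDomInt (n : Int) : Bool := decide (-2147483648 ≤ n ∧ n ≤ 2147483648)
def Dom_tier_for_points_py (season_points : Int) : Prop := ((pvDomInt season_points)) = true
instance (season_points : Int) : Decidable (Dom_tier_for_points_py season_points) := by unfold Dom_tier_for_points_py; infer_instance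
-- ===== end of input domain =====

-- B replaces A's linear scan-with-break by a bisect_right-style binary search over the
-- same sorted constant threshold list (alternative algorithm; same result).

-- ===== PORT A =====
def seasonThresholds : List Int :=
  [0, 50, 120, 200, 300, 420, 560, 720, 900, 1100, 1320,
   1560, 1820, 2100, 2400, 2720, 3060, 3420, 3800, 4200, 4620,
   5060, 5520, 6000, 6500, 7020, 7560, 8120, 8700, 9300, 9900]

def maxTier : Int := 30

-- A's 'for i in range(1, len(...)): if points >= THRESHOLDS[i]: tier = i else: break',
-- rendered as structural recursion over the suffix of the list starting at index 1,
-- carrying the loop index i and the 'tier' accumulator.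
def tierLoopA (season_points : Int) : List Int → Int → Int → Int
  | [], _, tier => tier
  | t :: rest, i, tier =>
    if season_points ≥ t then tierLoopA season_points rest (i + 1) i else tier

def tier_for_points_py (season_points : Int) : Int :=
  min (tierLoopA season_points (seasonThresholds.drop 1) 1 0) maxTier

-- ===== PORT B =====
-- B's while-loop binary search (bisect_right). 'mid' is always a valid index while
-- lo < hi ≤ length, so 'getD mid 0' is exactly Python's THRESHOLDS[mid].
def bsLoop (season_points : Int) (lo hi : Nat) : Nat :=
  if lo < hi then
    let mid := (lo + hi) / 2
    if season_points < seasonThresholds.getD mid 0 then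
      bsLoop season_points lo mid
    else
      bsLoop season_points (mid + 1) hi
  else lo
termination_by hi - lo
decreasing_by all_goals omega

def tier_for_points_py_alt (season_points : Int) : Int :=
  min (max ((bsLoop season_points 0 seasonThresholds.length : Int) - 1) 0) maxTier

-- ===== PRECONDITION & SPEC =====
def Spec_tier_for_points_py (season_points : Int) (out : Int) : Prop := out = tier_for_points_py_alt season_points
instance (season_points : Int) (out : Int) : Decidable (Spec_tier_for_points_py season_points out) := by unfold Spec_tier_for_points_py; infer_instance

-- ===== CLAIM (what is proved, stated in full; the proofs are below) =====
def Claim_equal_tier_for_points_py : Prop := ∀ (season_points : Int), Dom_tier_for_points_py season_points → Spec_tier_for_points_py season_points (tier_for_points_py season_points)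

-- ===== LEMMAS AND PROOFS =====

-- A's loop computes (i-1) + length of the leading run of thresholds ≤ points.
theorem tierLoopA_eq (p : Int) :
    ∀ (ts : List Int) (i : Int),
      tierLoopA p ts i (i - 1)
        = (i - 1) + ((ts.takeWhile (fun t => decide (t ≤ p))).length : Int) := by
  intro ts
  induction ts with
  | nil => intro i; simp [tierLoopA]
  | cons t rest ih =>
    intro i
    by_cases h : p ≥ t
    · have h' : decide (t ≤ p) = true := by simpa using h
      have hi := ih (i + 1)
      have e1 : i + 1 - 1 = i := by ring
      rw [e1] at hi
      simp only [tierLoopA, if_pos h]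
      rw [hi]
      simp [List.takeWhile_cons, h']
    · have h' : decide (t ≤ p) = false := by simpa using h
      simp [tierLoopA, if_neg h, List.takeWhile_cons, h']

-- Characterisation of takeWhile length on a sorted list: element j ≤ p iff j < that length.
theorem sorted_takeWhile_char (p : Int) :
    ∀ (ts : List Int), ts.Pairwise (· ≤ ·) →
      ∀ (j : Nat) (h : j < ts.length),
        (ts[j] ≤ p ↔ j < (ts.takeWhile (fun t => decide (t ≤ p))).length) := by
  intro ts
  induction ts with
  | nil => intro _ j h; simp at h
  | cons t rest ih =>
    intro hs j h
    have hs' := List.pairwise_cons.mp hs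
    by_cases ht : t ≤ p
    · have ht' : decide (t ≤ p) = true := by simpa using ht
      cases j with
      | zero => simp [List.takeWhile_cons, ht', ht]
      | succ j =>
        have hj : j < rest.length := by simpa using h
        have := ih hs'.2 j hj
        simp only [List.takeWhile_cons, ht', if_true, List.length_cons,
          List.getElem_cons_succ]
        constructor
        · intro hle; exact Nat.succ_lt_succ (this.mp hle)
        · intro hlt; exact this.mpr (Nat.lt_of_succ_lt_succ hlt)
    · have ht' : decide (t ≤ p) = false := by simpa using ht
      cases j with
      | zero => simp [List.takeWhile_cons, ht', ht]
      | succ j =>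
        have hj : j < rest.length := by simpa using h
        have hmem : rest[j] ∈ rest := List.getElem_mem hj
        have hle : t ≤ rest[j] := hs'.1 _ hmem
        simp [List.takeWhile_cons, ht']
        omega

theorem seasonThresholds_sorted : seasonThresholds.Pairwise (· ≤ ·) := by decide

-- Binary search correctness: if L satisfies the boundary characterisation and lo ≤ L ≤ hi,
-- bsLoop returns L.
theorem bsLoop_eq (p : Int) (L : Nat)
    (hchar : ∀ j (h : j < seasonThresholds.length), (seasonThresholds[j] ≤ p ↔ j < L)) :
    ∀ (lo hi : Nat), lo ≤ L → L ≤ hi → hi ≤ seasonThresholds.length →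
      bsLoop p lo hi = L := by
  intro lo hi
  induction hn : hi - lo using Nat.strong_induction_on generalizing lo hi with
  | _ n ih =>
    intro hlo hhi hlen
    rw [bsLoop]
    by_cases h : lo < hi
    · simp only [if_pos h]
      set mid := (lo + hi) / 2 with hmid
      have hm1 : lo ≤ mid := by omega
      have hm2 : mid < hi := by omega
      have hmlt : mid < seasonThresholds.length := by omega
      have hget : seasonThresholds.getD mid 0 = seasonThresholds[mid] :=
        List.getD_eq_getElem _ _ hmlt
      by_cases hc : p < seasonThresholds.getD mid 0
      · simp only [if_pos hc]
        have hng : ¬ seasonThresholds[mid] ≤ p := by rw [hget] at hc; omega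
        have hLmid : L ≤ mid := by
          by_contra hk
          exact hng ((hchar mid hmlt).mpr (by omega))
        exact ih (mid - lo) (by omega) lo mid rfl hlo hLmid (by omega)
      · simp only [if_neg hc]
        have hyes : seasonThresholds[mid] ≤ p := by rw [hget] at hc; omega
        have hLmid : mid + 1 ≤ L := (hchar mid hmlt).mp hyes
        exact ih (hi - (mid + 1)) (by omega) (mid + 1) hi rfl hLmid hhi hlen
    · simp only [if_neg h]; omega

theorem tier_head : seasonThresholds = 0 :: seasonThresholds.drop 1 := by decide

-- ===== VERDICT (by name: the statement is the Claim_ definition above) =====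
theorem tier_for_points_py_spec : Claim_equal_tier_for_points_py := by
  intro p _
  unfold Spec_tier_for_points_py tier_for_points_py tier_for_points_py_alt maxTier
  set L := (seasonThresholds.takeWhile (fun t => decide (t ≤ p))).length with hL
  have hBS : bsLoop p 0 seasonThresholds.length = L := by
    refine bsLoop_eq p L ?_ 0 seasonThresholds.length ?_ ?_ le_rfl
    · exact sorted_takeWhile_char p seasonThresholds seasonThresholds_sorted
    · omega
    · exact (List.takeWhile_prefix _).length_le
  have hA := tierLoopA_eq p (seasonThresholds.drop 1) 1
  have e1 : (1 : Int) - 1 = 0 := by norm_num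
  rw [e1] at hA
  rw [hA, hBS]
  by_cases h0 : (0 : Int) ≤ p
  · have h0' : decide ((0:Int) ≤ p) = true := by simpa using h0
    have hsucc : L = ((seasonThresholds.drop 1).takeWhile (fun t => decide (t ≤ p))).length + 1 := by
      rw [hL, tier_head, List.takeWhile_cons, h0']
      simp
    rw [hsucc]
    push_cast
    omega
  · have h0' : decide ((0:Int) ≤ p) = false := by simpa using h0
    have hLz : L = 0 := by rw [hL, tier_head, List.takeWhile_cons, h0']; simp
    have htail : ((seasonThresholds.drop 1).takeWhile (fun t => decide (t ≤ p))).length = 0 := by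
      have h50 : decide ((50:Int) ≤ p) = false := by
        simp only [decide_eq_false_iff_not]; omega
      have hd : seasonThresholds.drop 1 = 50 :: (seasonThresholds.drop 2) := by decide
      rw [hd, List.takeWhile_cons, h50]
      simp
    rw [hLz, htail]
    decide
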